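-- pv_equiv track=rewrite | github.com/vyalsgh-tech/my-timetable-next | tools/step50_restore_memo_click_features_context_lock.py | remove_method
-- ===== SOURCE A (Python) =====
-- def remove_method(text: str, method_name: str) -> str:
--     start = text.find(f"    def {method_name}(")
--     if start == -1:
--         return text
--
--     candidates = []
--     for marker in ["\n    def ", "\n    # ==========================================", "\nif __name__ == \"__main__\":"]:
--         pos = text.find(marker, start + 10)
--         if pos != -1:
--             candidates.append(pos)
--
--     if not candidates:
--         return text
--
--     return text[:start] + text[min(candidates):]
-- ===== SOURCE B (Python) =====
-- def remove_method(text: str, method_name: str) -> str: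
--     start = text.find(f"    def {method_name}(")
--     if start == -1:
--         return text
--     markers = ("\n    def ", "\n    # ==========================================", "\nif __name__ == \"__main__\":")
--     for j in range(start + 10, len(text)):
--         if text.startswith(markers, j):
--             return text[:start] + text[j:]
--     return text
-- ===== Notes on version B (the rewrite author's own statement) =====
-- stated objective: alternative
-- what changed: Instead of three separate text.find scans collected into a list and min()-ed, B does one forward scan from start+10 that stops at the first index where any of the three markers matches (str.startswith with a tuple), cutting there.
import Mathlib
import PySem

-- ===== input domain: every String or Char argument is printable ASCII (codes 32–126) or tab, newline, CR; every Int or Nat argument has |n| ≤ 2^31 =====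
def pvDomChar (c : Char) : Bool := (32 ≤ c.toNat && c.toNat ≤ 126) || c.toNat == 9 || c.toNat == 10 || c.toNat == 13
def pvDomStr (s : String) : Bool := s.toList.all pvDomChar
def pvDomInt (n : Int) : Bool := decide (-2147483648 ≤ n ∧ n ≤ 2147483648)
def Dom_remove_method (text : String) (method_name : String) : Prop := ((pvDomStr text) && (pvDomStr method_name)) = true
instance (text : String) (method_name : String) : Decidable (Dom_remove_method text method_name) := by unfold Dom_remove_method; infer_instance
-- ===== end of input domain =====

-- B replaces A's three separate find scans + min() by one forward scan from start+10 that
-- stops at the first index matching any of the three markers (alternative decomposition, same cost).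

-- the three terminator markers (shared data: both Pythons spell out the same three literals)
def pvMarkers : List String := ["\n    def ", "\n    # ==========================================", "\nif __name__ == \"__main__\":"]

-- ===== PORT A =====
def remove_method (text : String) (method_name : String) : String :=
  let s := text.toList
  let start := PySem.Chars.find s ("    def " ++ method_name ++ "(").toList
  if start = -1 then text
  else
    let candidates := pvMarkers.foldl (fun acc marker =>
      let pos := PySem.Chars.findFrom s marker.toList (start + 10)
      if pos ≠ -1 then acc ++ [pos] else acc) []
    match PySem.List.min? candidates (fun x => x) with
    | none => text
    | some m => String.ofList (PySem.List.slice s none (some start) ++ PySem.List.slice s (some m) none)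

-- ===== PORT B =====
-- B's loop 'for j in range(start+10, len(text)): if text.startswith(markers, j): …'
def pvScan (s : List Char) (j : Nat) : Option Nat :=
  if j < s.length then
    if pvMarkers.any (fun m => PySem.Chars.startswith (s.drop j) m.toList) then some j
    else pvScan s (j + 1)
  else none
termination_by s.length - j

def remove_method_alt (text : String) (method_name : String) : String :=
  let s := text.toList
  let start := PySem.Chars.find s ("    def " ++ method_name ++ "(").toList
  if start = -1 then text
  else
    match pvScan s (start.toNat + 10) with
    | none => text
    | some j => String.ofList (s.take start.toNat ++ s.drop j)

-- ===== PRECONDITION & SPEC =====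
def Spec_remove_method (text : String) (method_name : String) (out : String) : Prop := out = remove_method_alt text method_name
instance (text : String) (method_name : String) (out : String) : Decidable (Spec_remove_method text method_name out) := by unfold Spec_remove_method; infer_instance

-- ===== CLAIM (what is proved, stated in full; the proofs are below) =====
def Claim_equal_remove_method : Prop := ∀ (text : String) (method_name : String), Dom_remove_method text method_name → Spec_remove_method text method_name (remove_method text method_name)

-- ===== LEMMAS AND PROOFS =====

-- "some marker matches at position j"
def pvHit (s : List Char) (j : Nat) : Prop := ∃ m ∈ pvMarkers, m.toList <+: s.drop j

lemma pvMarkers_ne_nil : ∀ m ∈ pvMarkers, m.toList ≠ [] := by decide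

lemma pvAny_iff (s : List Char) (j : Nat) :
    (pvMarkers.any (fun m => PySem.Chars.startswith (s.drop j) m.toList) = true) ↔ pvHit s j := by
  simp [List.any_eq_true, PySem.Chars.startswith_iff, pvHit]

-- findFrom past the end of the string is -1
lemma pvFindFrom_past (s sub : List Char) (k : Nat) (h : s.length < k) :
    PySem.Chars.findFrom s sub (k : Int) = -1 := by
  simp only [PySem.Chars.findFrom]
  split_ifs with h1 h2 h3 <;> first | rfl | omega

-- the candidates fold is map-then-filter
lemma pvFoldl_cand (f : String → Int) (M : List String) (acc : List Int) :
    M.foldl (fun acc marker =>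
      let pos := f marker
      if pos ≠ -1 then acc ++ [pos] else acc) acc
    = acc ++ (M.map f).filter (fun x => x ≠ -1) := by
  induction M generalizing acc with
  | nil => simp
  | cons m t ih =>
    simp only [List.foldl_cons, List.map_cons, List.filter_cons]
    by_cases hm : f m = -1
    · simpa [hm] using ih acc
    · simpa [hm] using ih (acc ++ [f m])

-- scan returns none when no marker ever matches from k on
lemma pvScan_none (s : List Char) (k : Nat) (h : ∀ j, k ≤ j → ¬ pvHit s j) :
    pvScan s k = none := by
  rw [pvScan]
  split_ifs with h1 h2
  · exact absurd ((pvAny_iff s k).mp h2) (h k le_rfl)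
  · exact pvScan_none s (k + 1) (fun j hj => h j (by omega))
  · rfl
termination_by s.length - k

-- scan returns the least hit position
lemma pvScan_some (s : List Char) (k j : Nat) (hk : k ≤ j) (hjl : j < s.length)
    (hj : pvHit s j) (hmin : ∀ i, k ≤ i → i < j → ¬ pvHit s i) :
    pvScan s k = some j := by
  rw [pvScan]
  by_cases heq : k = j
  · subst heq
    rw [if_pos hjl, if_pos ((pvAny_iff s k).mpr hj)]
  · have hlt : k < j := lt_of_le_of_ne hk heq
    have hkl : k < s.length := lt_of_lt_of_le hlt (le_of_lt hjl)
    rw [if_pos hkl, if_neg, pvScan_some s (k + 1) j hlt hjl hj (fun i hi hij => hmin i (by omega) hij)]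
    intro hcon
    exact hmin k le_rfl hlt ((pvAny_iff s k).mp hcon)
termination_by j - k

-- a prefix at a later position is an infix of the earlier suffix
lemma pvPrefix_drop_infix (s sub : List Char) (k i : Nat) (hki : k ≤ i)
    (h : sub <+: s.drop i) : sub <:+: s.drop k := by
  have hsuf : s.drop i <:+ s.drop k := by
    have h1 := List.drop_suffix (i - k) (s.drop k)
    rw [List.drop_drop] at h1
    have h2 : k + (i - k) = i := by omega
    rwa [h2] at h1
  exact h.isInfix.trans hsuf.isInfix

-- the heart: A's min-of-finds picks the same cut as B's forward scan
lemma pv_main (text : String) (start : Int) (h0 : 0 ≤ start) :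
    (match PySem.List.min?
        (pvMarkers.foldl (fun acc marker =>
          let pos := PySem.Chars.findFrom text.toList marker.toList (start + 10)
          if pos ≠ -1 then acc ++ [pos] else acc) []) (fun x => x) with
      | none => text
      | some m => String.ofList (PySem.List.slice text.toList none (some start) ++ PySem.List.slice text.toList (some m) none))
    = (match pvScan text.toList (start.toNat + 10) with
      | none => text
      | some j => String.ofList (text.toList.take start.toNat ++ text.toList.drop j)) := by
  have hcast : start + 10 = ((start.toNat + 10 : Nat) : Int) := by omega
  simp only [hcast]
  rw [pvFoldl_cand (fun marker => PySem.Chars.findFrom text.toList marker.toList ((start.toNat + 10 : Nat) : Int)) pvMarkers []]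
  rw [List.nil_append]
  by_cases hkl : start.toNat + 10 ≤ text.toList.length
  case neg =>
    have hall : (pvMarkers.map (fun marker => PySem.Chars.findFrom text.toList marker.toList ((start.toNat + 10 : Nat) : Int))).filter (fun x => x ≠ -1) = [] := by
      rw [List.filter_eq_nil_iff]
      intro x hx
      rcases List.mem_map.mp hx with ⟨m, _, rfl⟩
      simp only [decide_eq_true_eq, not_not]
      exact pvFindFrom_past text.toList m.toList (start.toNat + 10) (by omega)
    rw [hall, pvScan, if_neg (by omega)]
    rfl
  case pos =>
    cases hmin : PySem.List.min?
        ((pvMarkers.map (fun marker => PySem.Chars.findFrom text.toList marker.toList ((start.toNat + 10 : Nat) : Int))).filter (fun x => x ≠ -1)) (fun x => x) with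
    | none =>
      have hnil := (PySem.List.min?_eq_none_iff _ _).mp hmin
      have hnohit : ∀ j, start.toNat + 10 ≤ j → ¬ pvHit text.toList j := by
        rintro j hj ⟨m, hm, hpre⟩
        have hinf := pvPrefix_drop_infix text.toList m.toList (start.toNat + 10) j hj hpre
        have hne : PySem.Chars.findFrom text.toList m.toList ((start.toNat + 10 : Nat) : Int) ≠ -1 := by
          intro hcon
          exact ((PySem.Chars.findFrom_natCast_eq_neg_one_iff text.toList m.toList _ hkl).mp hcon) hinf
        have hmem : PySem.Chars.findFrom text.toList m.toList ((start.toNat + 10 : Nat) : Int)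
            ∈ (pvMarkers.map (fun marker => PySem.Chars.findFrom text.toList marker.toList ((start.toNat + 10 : Nat) : Int))).filter (fun x => x ≠ -1) := by
          rw [List.mem_filter]
          exact ⟨List.mem_map.mpr ⟨m, hm, rfl⟩, by simpa using hne⟩
        rw [hnil] at hmem
        exact absurd hmem (List.not_mem_nil)
      rw [pvScan_none text.toList (start.toNat + 10) hnohit]
    | some c =>
      have hcmem := PySem.List.min?_mem hmin
      rw [List.mem_filter] at hcmem
      rcases List.mem_map.mp hcmem.1 with ⟨m, hm, hfm⟩
      have hcne : c ≠ -1 := by simpa using hcmem.2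
      rw [← hfm] at hcne
      obtain ⟨hle, hpre, hloc⟩ := PySem.Chars.findFrom_natCast_spec text.toList m.toList _ hkl hcne
      rw [hfm] at hle hpre hloc
      have hc0 : 0 ≤ c := le_trans (by positivity) hle
      have hck : start.toNat + 10 ≤ c.toNat := by omega
      have hhit : pvHit text.toList c.toNat := ⟨m, hm, hpre⟩
      have hclen : c.toNat < text.toList.length := by
        by_contra hcon
        have : text.toList.drop c.toNat = [] := List.drop_eq_nil_iff.mpr (by omega)
        rw [this] at hpre
        exact pvMarkers_ne_nil m hm (List.prefix_nil.mp hpre)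
      have hminall : ∀ i, start.toNat + 10 ≤ i → i < c.toNat → ¬ pvHit text.toList i := by
        rintro i hki hic ⟨m', hm', hpre'⟩
        have hinf := pvPrefix_drop_infix text.toList m'.toList (start.toNat + 10) i hki hpre'
        have hne' : PySem.Chars.findFrom text.toList m'.toList ((start.toNat + 10 : Nat) : Int) ≠ -1 := by
          intro hcon
          exact ((PySem.Chars.findFrom_natCast_eq_neg_one_iff text.toList m'.toList _ hkl).mp hcon) hinf
        have hmem' : PySem.Chars.findFrom text.toList m'.toList ((start.toNat + 10 : Nat) : Int)
            ∈ (pvMarkers.map (fun marker => PySem.Chars.findFrom text.toList marker.toList ((start.toNat + 10 : Nat) : Int))).filter (fun x => x ≠ -1) := by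
          rw [List.mem_filter]
          exact ⟨List.mem_map.mpr ⟨m', hm', rfl⟩, by simpa using hne'⟩
        have hcle : c ≤ PySem.Chars.findFrom text.toList m'.toList ((start.toNat + 10 : Nat) : Int) :=
          PySem.List.min?_isMin hmin _ hmem'
        obtain ⟨_, _, hloc'⟩ := PySem.Chars.findFrom_natCast_spec text.toList m'.toList _ hkl hne'
        exact hloc' i hki (by omega) hpre'
      rw [pvScan_some text.toList (start.toNat + 10) c.toNat hck hclen hhit hminall]
      have hdrop : PySem.List.slice text.toList (some c) none = text.toList.drop c.toNat :=
        PySem.List.slice_from text.toList hc0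
      have htake : PySem.List.slice text.toList none (some start) = text.toList.take start.toNat :=
        PySem.List.slice_to text.toList h0
      simp [hdrop, htake]

theorem pv_equal (text method_name : String) :
    remove_method text method_name = remove_method_alt text method_name := by
  show (if PySem.Chars.find text.toList ("    def " ++ method_name ++ "(").toList = -1 then text
    else
      match PySem.List.min?
          (pvMarkers.foldl (fun acc marker =>
            let pos := PySem.Chars.findFrom text.toList marker.toList
              (PySem.Chars.find text.toList ("    def " ++ method_name ++ "(").toList + 10)
            if pos ≠ -1 then acc ++ [pos] else acc) []) (fun x => x) with
        | none => text
        | some m => String.ofList (PySem.List.slice text.toList none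
            (some (PySem.Chars.find text.toList ("    def " ++ method_name ++ "(").toList))
            ++ PySem.List.slice text.toList (some m) none))
    = (if PySem.Chars.find text.toList ("    def " ++ method_name ++ "(").toList = -1 then text
    else
      match pvScan text.toList ((PySem.Chars.find text.toList ("    def " ++ method_name ++ "(").toList).toNat + 10) with
        | none => text
        | some j => String.ofList (text.toList.take
            (PySem.Chars.find text.toList ("    def " ++ method_name ++ "(").toList).toNat
            ++ text.toList.drop j))
  by_cases h0 : PySem.Chars.find text.toList ("    def " ++ method_name ++ "(").toList = -1
  · rw [if_pos h0, if_pos h0]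
  · rw [if_neg h0, if_neg h0]
    have hge : 0 ≤ PySem.Chars.find text.toList ("    def " ++ method_name ++ "(").toList := by
      have := PySem.Chars.neg_one_le_find text.toList ("    def " ++ method_name ++ "(").toList
      omega
    exact pv_main text _ hge

-- ===== VERDICT (by name: the statement is the Claim_ definition above) =====
theorem remove_method_spec : Claim_equal_remove_method := by
  intro text method_name _
  unfold Spec_remove_method
  exact pv_equal text method_name
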